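-- pv_equiv track=rewrite | github.com/srimant03/Intro-to-Programming-Pyhton- | maths&python/conversion-of-nos.py | decimal_binary
-- ===== SOURCE A (Python) =====
-- def decimal_binary(n):
--     n=int(n)
--     l=[]
--     while n!=0:
--         i=n%2
--         n=n//2
--         l.append(i)
--     l=l[::-1]
--     return l
-- ===== SOURCE B (Python) =====
-- def decimal_binary(n):
--     n = int(n)
--     k = n.bit_length()
--     return [(n >> i) & 1 for i in range(k - 1, -1, -1)]
-- ===== Notes on version B (the rewrite author's own statement) =====
-- stated objective: idiomatic
-- what changed: Replaces the while-loop that appends LSB-first remainders and then reverses with direct bit extraction: compute the bit length once via int.bit_length() and read each bit MSB-first with shift-and-mask in a single comprehension, no accumulator and no reverse.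
import Mathlib
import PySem

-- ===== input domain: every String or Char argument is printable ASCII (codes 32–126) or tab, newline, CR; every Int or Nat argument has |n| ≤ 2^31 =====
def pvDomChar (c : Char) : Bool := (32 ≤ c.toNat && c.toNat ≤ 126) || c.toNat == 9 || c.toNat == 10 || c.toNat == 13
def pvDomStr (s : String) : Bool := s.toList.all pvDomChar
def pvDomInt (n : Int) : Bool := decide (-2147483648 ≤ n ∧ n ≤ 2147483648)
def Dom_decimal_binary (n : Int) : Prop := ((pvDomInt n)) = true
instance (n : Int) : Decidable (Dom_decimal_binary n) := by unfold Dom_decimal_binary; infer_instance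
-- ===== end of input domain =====

-- B replaces A's while-loop (append remainders, then reverse) with direct MSB-first bit
-- extraction: bit_length() once, then shift-and-mask in one comprehension (idiomatic; no reverse).
-- Equivalence is claimed for 0 ≤ n (Python A loops forever on negative n).


-- termination helper for port A's loop (cited by name in decreasing_by)
theorem pvHalf_lt (n : Int) (h : 0 < n) : (PySem.Int.floordiv n 2).toNat < n.toNat := by
  unfold PySem.Int.floordiv
  rw [Int.fdiv_eq_ediv]
  omega

-- ===== PORT A =====
-- the while loop: state is (n, l); the guard `n ≤ 0` coincides with Python's `n != 0` on the
-- claimed domain 0 ≤ n (for n < 0 the Python loop never terminates; excluded by Pre_)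
def decimal_binary_loop (n : Int) (l : List Int) : List Int :=
  if n ≤ 0 then l
  else
    decimal_binary_loop (PySem.Int.floordiv n 2) (l ++ [PySem.Int.mod n 2])
termination_by n.toNat
decreasing_by exact pvHalf_lt n (by omega)

def decimal_binary (n : Int) : List Int :=
  -- n = int(n) is the identity on an int argument
  (decimal_binary_loop n []).reverse   -- l = l[::-1] : full reverse

-- ===== PORT B =====
-- k = n.bit_length(); [(n >> i) & 1 for i in range(k-1, -1, -1)]
-- (n >> i ported as n >>> i.toNat: every i drawn from this range is ≥ 0)
def decimal_binary_alt (n : Int) : List Int :=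
  let k : Nat := PySem.Int.bitLength n
  (PySem.List.pyRange ((k : Int) - 1) (-1) (-1)).map
    (fun i => PySem.Int.band (n >>> i.toNat) 1)

-- ===== PRECONDITION & SPEC =====
-- Pre_ excludes negative n, on which Python A's while loop never terminates (n//2 floors toward -∞).
def Pre_decimal_binary (n : Int) : Prop := 0 ≤ n
instance (n : Int) : Decidable (Pre_decimal_binary n) := by unfold Pre_decimal_binary; infer_instance
def pvWitness_decimal_binary : Int := (13)

def Spec_decimal_binary (n : Int) (out : List Int) : Prop := out = decimal_binary_alt n
instance (n : Int) (out : List Int) : Decidable (Spec_decimal_binary n out) := by unfold Spec_decimal_binary; infer_instance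

-- ===== CLAIM (what is proved, stated in full; the proofs are below) =====
def Claim_equal_decimal_binary : Prop := ∀ (n : Int), Dom_decimal_binary n → Pre_decimal_binary n → Spec_decimal_binary n (decimal_binary n)

-- ===== LEMMAS AND PROOFS =====

-- the LSB-first digit list A's loop accumulates (proof-only helper)
def pvLsb (n : Int) : List Int :=
  if n ≤ 0 then []
  else PySem.Int.mod n 2 :: pvLsb (PySem.Int.floordiv n 2)
termination_by n.toNat
decreasing_by exact pvHalf_lt n (by omega)

theorem decimal_binary_loop_eq (n : Int) (l : List Int) :
    decimal_binary_loop n l = l ++ pvLsb n := by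
  by_cases h : n ≤ 0
  · rw [decimal_binary_loop, pvLsb]; simp [h]
  · rw [decimal_binary_loop, pvLsb]
    simp only [h, if_false]
    rw [decimal_binary_loop_eq (PySem.Int.floordiv n 2)]
    simp
termination_by n.toNat
decreasing_by exact pvHalf_lt n (by omega)

-- shifting one more bit is shifting the floor-halved number (Int exponent written as a Nat cast)
theorem pvShift_succ (n : Int) (j : Nat) :
    n >>> ((j + 1 : Nat) : Int) = (PySem.Int.floordiv n 2) >>> ((j : Nat) : Int) := by
  rw [Int.shiftRight_natCast_right, Int.shiftRight_natCast_right]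
  rw [Int.shiftRight_eq_div_pow, Int.shiftRight_eq_div_pow]
  unfold PySem.Int.floordiv
  rw [Int.fdiv_eq_ediv]
  simp only [show ((0:Int) ≤ 2 ∨ (2:Int) ∣ n) = True by simp, if_true, sub_zero]
  rw [Int.ediv_ediv_of_nonneg (by norm_num : (0:Int) ≤ 2)]
  congr 1
  push_cast
  ring

-- A's LSB-first list is the ascending-index bit extraction
theorem pvLsb_eq_map (n : Int) (hn : 0 ≤ n) :
    pvLsb n = (PySem.List.pyRange 0 ((PySem.Int.bitLength n : Nat) : Int) 1).map
      (fun i => PySem.Int.band (n >>> i.toNat) 1) := by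
  by_cases h : n ≤ 0
  · have h0 : n = 0 := le_antisymm h hn
    subst h0
    rw [pvLsb]
    simp [PySem.Int.bitLength_zero, PySem.List.pyRange_one_eq_nil]
  · have hpos : 0 < n := by omega
    have hbl : PySem.Int.bitLength n = PySem.Int.bitLength (PySem.Int.floordiv n 2) + 1 :=
      PySem.Int.bitLength_of_pos hpos
    have hhalf : 0 ≤ PySem.Int.floordiv n 2 := by
      unfold PySem.Int.floordiv; rw [Int.fdiv_eq_ediv]; omega
    rw [pvLsb]
    simp only [h, if_false]
    rw [pvLsb_eq_map (PySem.Int.floordiv n 2) hhalf, hbl]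
    set k' : Nat := PySem.Int.bitLength (PySem.Int.floordiv n 2) with hk'
    have hcast : ((k' + 1 : Nat) : Int) = (k' : Int) + 1 := by push_cast; ring
    rw [hcast]
    conv_rhs => rw [PySem.List.pyRange_one_cons (by omega)]
    simp only [List.map_cons]
    congr 1
    · -- head: (n >> 0) & 1 = n % 2
      rw [show ((0:Int).toNat) = 0 from rfl, PySem.Int.band_one,
        Int.shiftRight_natCast_right, Int.shiftRight_eq_div_pow]
      norm_num
    · -- tail: one halving shifts every index by one
      rw [PySem.List.pyRange_one, PySem.List.pyRange_one, List.map_map, List.map_map]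
      have hlen : (((k':Int) + 1) - (0 + 1)).toNat = ((k':Int) - 0).toNat := by omega
      rw [hlen]
      apply List.map_congr_left
      intro j _
      simp only [Function.comp_apply, zero_add]
      have ht1 : ((1 : Int) + (j:Int)).toNat = j + 1 := by omega
      have ht2 : ((j:Int)).toNat = j := by omega
      rw [ht1, ht2, pvShift_succ]
termination_by n.toNat
decreasing_by exact pvHalf_lt n (by omega)

-- ===== VERDICT (by name: the statement is the Claim_ definition above) =====
theorem decimal_binary_spec : Claim_equal_decimal_binary := by
  intro n _ hpre
  unfold Spec_decimal_binary decimal_binary decimal_binary_alt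
  rw [decimal_binary_loop_eq, pvLsb_eq_map n hpre]
  simp [PySem.List.pyRange_neg_one_eq_reverse]
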